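-- pv_equiv track=rewrite | github.com/davey-1/UCSDX-ALGS201x---Data-Structures-Fundamentals | week2_priority_queues_and_disjoint_sets/2_job_queue/job_queue.py | fast_assign
-- ===== SOURCE A (Python) =====
-- def fast_assign(n_workers, jobs):
--
--     result = [] #list of len(jobs) results, with each entry as a tuple of: worker, time started
--     pq = []
--
--     for i in range(n_workers):
--
--         pq.append([0,i]) #initialize each worker with nft = 0, worker_id#
--
--     for i in range(len(jobs)):
--
--         #assign the next free thread to job i
--         free_thread = pq.pop(0)
--         result.append(free_thread)
--
--         #update the current thread's next free time
--         pq.append( [free_thread[0] + jobs[i], free_thread[1]] )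
--         #pq.sort()
--
--     return result
-- ===== SOURCE B (Python) =====
-- def fast_assign(n_workers, jobs):
--     # Direct round-robin: job i goes to worker i % n_workers; keep a running
--     # per-worker total of assigned work instead of rotating a queue.
--     totals = [0] * n_workers
--     result = []
--     w = 0
--     for job in jobs:
--         result.append([totals[w], w])
--         totals[w] += job
--         w = (w + 1) % n_workers
--     return result
-- ===== Notes on version B (the rewrite author's own statement) =====
-- stated objective: faster
-- what changed: Replaces the rotating queue (pop(0)+append per job, plus result built from shared queue cells) with direct round-robin indexing: worker = cycling counter, start time = running per-worker total array, so each job is O(1) instead of an O(n) list pop.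
import Mathlib
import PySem

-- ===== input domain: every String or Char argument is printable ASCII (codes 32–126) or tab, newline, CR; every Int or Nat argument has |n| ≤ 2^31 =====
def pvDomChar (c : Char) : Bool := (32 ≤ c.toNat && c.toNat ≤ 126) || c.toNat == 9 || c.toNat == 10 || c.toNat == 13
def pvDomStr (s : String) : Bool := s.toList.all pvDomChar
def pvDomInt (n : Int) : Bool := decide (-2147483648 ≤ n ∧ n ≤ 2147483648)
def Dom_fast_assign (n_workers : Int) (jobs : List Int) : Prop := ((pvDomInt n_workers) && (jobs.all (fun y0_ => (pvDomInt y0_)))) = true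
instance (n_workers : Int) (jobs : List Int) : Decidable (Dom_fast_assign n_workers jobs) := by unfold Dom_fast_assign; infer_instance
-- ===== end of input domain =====

-- B replaces A's rotating queue (pop(0)+append per job) with direct round-robin indexing
-- into a running per-worker total array: asymptotically faster (O(1) per job).

-- ===== PORT A =====
-- A's loop state: (result, pq); pq.pop(0) on an empty pq raises IndexError in Python —
-- the empty-pq branch is unreachable under Pre_ (the state is returned unchanged there).
def fast_assign (n_workers : Int) (jobs : List Int) : List (List Int) :=
  let pq0 : List (List Int) := (PySem.List.pyRange 0 n_workers 1).map (fun i => [0, i])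
  let st := (PySem.List.pyRange 0 (jobs.length : Int) 1).foldl
    (fun (st : List (List Int) × List (List Int)) i =>
      match st with
      | (result, pq) =>
        match pq with
        | [] => (result, pq)   -- IndexError in Python; outside Pre_
        | free_thread :: pqrest =>
          (result ++ [free_thread],
           pqrest ++ [[PySem.List.pyGetD free_thread 0 0 + PySem.List.pyGetD jobs i 0,
                       PySem.List.pyGetD free_thread 1 0]]))
    ([], pq0)
  st.1

-- ===== PORT B =====
-- B's loop state: (result, totals, w).  totals[w] indexing uses pyGetD/pySetD (in range
-- under Pre_; Python raises outside Pre_), and (w+1) % n_workers uses PySem.Int.mod?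
-- (none only when n_workers = 0, i.e. outside Pre_ for nonempty jobs).
def fast_assign_alt (n_workers : Int) (jobs : List Int) : List (List Int) :=
  let totals0 : List Int := List.replicate n_workers.toNat 0   -- [0] * n_workers
  let st := jobs.foldl
    (fun (st : List (List Int) × List Int × Int) job =>
      match st with
      | (result, totals, w) =>
        (result ++ [[PySem.List.pyGetD totals w 0, w]],
         PySem.List.pySetD totals w (PySem.List.pyGetD totals w 0 + job),
         (PySem.Int.mod? (w + 1) n_workers).getD 0))
    ([], totals0, 0)
  st.1

-- ===== PRECONDITION & SPEC =====
-- Pre_ excludes exactly the inputs where A raises: n_workers ≤ 0 with jobs nonempty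
-- (pq.pop(0) on an empty queue raises IndexError; B raises there too).
def Pre_fast_assign (n_workers : Int) (jobs : List Int) : Prop := jobs = [] ∨ 1 ≤ n_workers
instance (n_workers : Int) (jobs : List Int) : Decidable (Pre_fast_assign n_workers jobs) := by unfold Pre_fast_assign; infer_instance
def pvWitness_fast_assign : Int × List Int := (2, [3, 1, 4])

def Spec_fast_assign (n_workers : Int) (jobs : List Int) (out : List (List Int)) : Prop := out = fast_assign_alt n_workers jobs
instance (n_workers : Int) (jobs : List Int) (out : List (List Int)) : Decidable (Spec_fast_assign n_workers jobs out) := by unfold Spec_fast_assign; infer_instance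

-- ===== CLAIM (what is proved, stated in full; the proofs are below) =====
def Claim_equal_fast_assign : Prop := ∀ (n_workers : Int) (jobs : List Int), Dom_fast_assign n_workers jobs → Pre_fast_assign n_workers jobs → Spec_fast_assign n_workers jobs (fast_assign n_workers jobs)

-- ===== LEMMAS AND PROOFS =====


-- ===== LEMMAS AND PROOFS =====
-- A's loop body as a named step function (fast_assign's fold is this step, once the
-- range-index fold is rewritten to a fold over jobs).
def stepA (st : List (List Int) × List (List Int)) (job : Int) : List (List Int) × List (List Int) :=
  match st with
  | (result, pq) =>
    match pq with
    | [] => (result, pq)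
    | free_thread :: pqrest =>
      (result ++ [free_thread],
       pqrest ++ [[PySem.List.pyGetD free_thread 0 0 + job, PySem.List.pyGetD free_thread 1 0]])

-- B's loop body as a named step function.
def stepB (n_workers : Int) (st : List (List Int) × List Int × Int) (job : Int) :
    List (List Int) × List Int × Int :=
  match st with
  | (result, totals, w) =>
    (result ++ [[PySem.List.pyGetD totals w 0, w]],
     PySem.List.pySetD totals w (PySem.List.pyGetD totals w 0 + job),
     (PySem.Int.mod? (w + 1) n_workers).getD 0)

-- The coupling invariant: A's queue is the rotation of B's totals array starting at
-- worker w, each cell paired with its worker id.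
def RRInv (m : Nat) (pq : List (List Int)) (totals : List Int) (w : Nat) : Prop :=
  totals.length = m ∧ w < m ∧
  pq = (List.range m).map (fun j => [totals.getD ((w + j) % m) 0, (((w + j) % m : Nat) : Int)])

lemma rot_ne (m w j : Nat) (hw : w < m) (hj : j + 1 < m) : (w + 1 + j) % m ≠ w := by
  rcases Nat.lt_or_ge (w + 1 + j) m with h | h
  · rw [Nat.mod_eq_of_lt h]; omega
  · rw [Nat.mod_eq_sub_mod h, Nat.mod_eq_of_lt (by omega)]; omega

-- Peeling the front of a rotation of [0, m).
lemma map_range_rot {α : Type} (k w : Nat) (hw : w < k + 1) (f : Nat → α) :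
    (List.range (k + 1)).map (fun j => f ((w + j) % (k + 1)))
      = f w :: (List.range k).map (fun j => f ((w + 1 + j) % (k + 1))) := by
  rw [List.range_succ_eq_map, List.map_cons, List.map_map]
  congr 1
  · rw [Nat.add_zero, Nat.mod_eq_of_lt hw]
  · apply List.map_congr_left
    intro j _
    simp only [Function.comp, Nat.succ_eq_add_one,
      show w + (j + 1) = w + 1 + j from by omega]

-- Pushing the served worker to the back of the rotation.
lemma rot_shift {α : Type} (k w : Nat) (hw : w < k + 1) (f g : Nat → α)
    (hfg : ∀ i, i ≠ w → g i = f i) :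
    (List.range (k + 1)).map (fun j => g (((w + 1) % (k + 1) + j) % (k + 1)))
      = (List.range k).map (fun j => f ((w + 1 + j) % (k + 1))) ++ [g w] := by
  rw [List.range_succ, List.map_append, List.map_singleton]
  congr 1
  · apply List.map_congr_left
    intro j hj
    rw [List.mem_range] at hj
    rw [Nat.mod_add_mod, hfg _ (rot_ne (k + 1) w j hw (by omega))]
  · rw [Nat.mod_add_mod, show w + 1 + k = w + (k + 1) from by omega,
        Nat.add_mod_right, Nat.mod_eq_of_lt hw]

lemma getD_set_self (xs : List Int) (i : Nat) (v : Int) (h : i < xs.length) :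
    (xs.set i v).getD i 0 = v := by
  simp [List.getD_eq_getElem?_getD, h]

-- The main loop invariant: from coupled states, both folds produce the same results.
lemma fold_eq (n : Int) (k : Nat) (hmn : ((k : Int) + 1) = n) (jobs : List Int) :
    ∀ (res : List (List Int)) (pq : List (List Int)) (totals : List Int) (w : Nat),
      RRInv (k + 1) pq totals w →
      (jobs.foldl stepA (res, pq)).1 = (jobs.foldl (stepB n) (res, totals, (w : Int))).1 := by
  induction jobs with
  | nil => intro res pq totals w _; rfl
  | cons job rest ih =>
    intro res pq totals w hInv
    obtain ⟨hlen, hw, hpq⟩ := hInv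
    replace hpq : pq = [totals.getD w 0, (w : Int)] ::
        (List.range k).map (fun j => (fun i => [totals.getD i 0, ((i : Nat) : Int)]) ((w + 1 + j) % (k + 1))) := by
      rw [hpq]; exact map_range_rot k w hw (fun i => [totals.getD i 0, ((i : Nat) : Int)])
    simp only [List.foldl_cons]
    rw [hpq]
    have hnne : n ≠ 0 := by omega
    have hmod : (PySem.Int.mod? ((w : Int) + 1) n).getD 0 = (((w + 1) % (k + 1) : Nat) : Int) := by
      simp only [PySem.Int.mod?, if_neg hnne, Option.getD_some]
      rw [show ((w : Int) + 1).fmod n = PySem.Int.mod ((w : Int) + 1) n from rfl,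
          PySem.Int.mod_eq_emod_of_pos (by omega : (0:Int) < n), ← hmn]
      push_cast
      rfl
    have hA : stepA (res, [totals.getD w 0, (w : Int)] ::
        (List.range k).map (fun j => (fun i => [totals.getD i 0, ((i : Nat) : Int)]) ((w + 1 + j) % (k + 1)))) job
      = (res ++ [[totals.getD w 0, (w : Int)]],
         (List.range k).map (fun j => (fun i => [totals.getD i 0, ((i : Nat) : Int)]) ((w + 1 + j) % (k + 1)))
           ++ [[totals.getD w 0 + job, (w : Int)]]) := by
      simp [stepA, PySem.List.pyGetD]
    have hB : stepB n (res, totals, (w : Int)) job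
      = (res ++ [[totals.getD w 0, (w : Int)]],
         totals.set w (totals.getD w 0 + job),
         (((w + 1) % (k + 1) : Nat) : Int)) := by
      simp [stepB, hmod]
    rw [hA, hB]
    apply ih
    refine ⟨by simp [hlen], Nat.mod_lt _ (by omega), ?_⟩
    have hrs := rot_shift k w hw (fun i => [totals.getD i 0, ((i : Nat) : Int)])
      (fun i => [(totals.set w (totals.getD w 0 + job)).getD i 0, ((i : Nat) : Int)])
      (fun i hi => by simp [List.getD_eq_getElem?_getD, List.getElem?_set_ne (Ne.symm hi)])
    beta_reduce at hrs
    rw [getD_set_self _ _ _ (by omega)] at hrs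
    simpa using hrs.symm

lemma fast_assign_eq_fold (n_workers : Int) (jobs : List Int) :
    fast_assign n_workers jobs
      = (jobs.foldl stepA ([], (PySem.List.pyRange 0 n_workers 1).map (fun i => [0, i]))).1 := by
  unfold fast_assign
  exact congrArg Prod.fst
    (PySem.List.foldl_pyRange_zero_pyGetD' jobs 0 stepA
      ([], (PySem.List.pyRange 0 n_workers 1).map (fun i => [0, i])))

lemma alt_eq_fold (n_workers : Int) (jobs : List Int) :
    fast_assign_alt n_workers jobs
      = (jobs.foldl (stepB n_workers) ([], List.replicate n_workers.toNat 0, 0)).1 := rfl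

lemma init_inv (n : Int) (k : Nat) (hmn : ((k : Int) + 1) = n) :
    RRInv (k + 1) ((PySem.List.pyRange 0 n 1).map (fun i => [0, i]))
      (List.replicate n.toNat 0) 0 := by
  have hton : n.toNat = k + 1 := by omega
  refine ⟨by simp [hton], by omega, ?_⟩
  rw [PySem.List.pyRange_one, List.map_map]
  simp only [Int.sub_zero, hton]
  apply List.map_congr_left
  intro j hj
  rw [List.mem_range] at hj
  simp [Nat.mod_eq_of_lt hj]

-- ===== VERDICT =====
theorem fast_assign_spec : Claim_equal_fast_assign := by
  intro n_workers jobs _ hpre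
  unfold Spec_fast_assign
  rcases hpre with h | h
  · subst h
    rfl
  · obtain ⟨k, hk⟩ : ∃ k : Nat, ((k : Int) + 1) = n_workers := ⟨(n_workers - 1).toNat, by omega⟩
    rw [fast_assign_eq_fold, alt_eq_fold]
    simpa using fold_eq n_workers k hk jobs [] _ _ 0 (init_inv n_workers k hk)
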